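-- pv_equiv track=rewrite | github.com/clemencebc1/SAE_CRYPTO | crypto.py | build_antigramme
-- ===== SOURCE A (Python) =====
-- def build_antigramme(decyphering_grid: dict, key: str = 'CRYPTO') -> list[str]:
--     """Construit l'antigramme utilisé pour déchiffrer le message ADFGVX.
--
--     Args:
--         decyphering_grid (dict): La grille de déchiffrement.
--         key (str, optional): La clé publique. Par défaut 'CRYPTO'.
--
--     Returns:
--         list[str]: L'antigramme du message.
--     """
--     ALPHA = 'ABCDEFGHIJKLMNOPQRSTUVWXYZ'
--     iter = len(decyphering_grid[key[0]])
--     res = []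
--     cyphered_antigramme = ''
--     splited_antigramme = ''
--     for i in range(iter):
--         for value in decyphering_grid.values():
--             cyphered_antigramme += value[i]
--     for i in range(len(cyphered_antigramme)):
--         if cyphered_antigramme[i] in ALPHA:
--             splited_antigramme += cyphered_antigramme[i]
--         else:
--             res.append(cyphered_antigramme[i])
--         if len(splited_antigramme) == 2:
--             res.append(splited_antigramme)
--             splited_antigramme = ''
--     return res
-- ===== SOURCE B (Python) =====
-- def build_antigramme(decyphering_grid: dict, key: str = 'CRYPTO') -> list[str]:
--     """Different algorithm: collect the column-major characters once, extract and
--     pre-pair the letters by index arithmetic, then merge the pre-built pairs back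
--     with the non-letter characters in a single positional pass (no running buffer)."""
--     ALPHA = 'ABCDEFGHIJKLMNOPQRSTUVWXYZ'
--     cols = list(decyphering_grid.values())
--     n = len(decyphering_grid[key[0]])
--     chars = [col[i] for i in range(n) for col in cols]
--     letters = [c for c in chars if c in ALPHA]
--     pairs = []
--     j = 0
--     while j + 1 < len(letters):
--         pairs.append(letters[j] + letters[j + 1])
--         j += 2
--     res = []
--     k = 0
--     odd = False
--     for c in chars:
--         if c in ALPHA:
--             if odd:
--                 res.append(pairs[k])
--                 k += 1
--                 odd = False
--             else:
--                 odd = True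
--         else:
--             res.append(c)
--     return res
-- ===== Notes on version B (the rewrite author's own statement) =====
-- stated objective: alternative
-- what changed: Instead of A's running two-char buffer, B pre-extracts the letters of the column-major character list, pairs them up once by index arithmetic, and then merges the ready-made pairs back with the non-letter characters in one positional pass.
import Mathlib
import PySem

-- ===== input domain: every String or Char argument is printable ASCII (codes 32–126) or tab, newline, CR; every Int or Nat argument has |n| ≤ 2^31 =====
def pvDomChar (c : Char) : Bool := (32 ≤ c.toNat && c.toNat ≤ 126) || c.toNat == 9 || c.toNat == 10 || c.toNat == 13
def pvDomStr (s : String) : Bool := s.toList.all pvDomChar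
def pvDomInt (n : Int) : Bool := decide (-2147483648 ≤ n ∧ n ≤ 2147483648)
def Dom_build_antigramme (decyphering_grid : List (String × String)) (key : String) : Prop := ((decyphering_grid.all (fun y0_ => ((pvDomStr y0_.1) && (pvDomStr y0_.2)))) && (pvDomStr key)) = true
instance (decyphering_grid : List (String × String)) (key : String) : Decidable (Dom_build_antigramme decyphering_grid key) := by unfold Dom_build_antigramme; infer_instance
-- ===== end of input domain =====

-- B replaces A's running two-char buffer by pre-pairing the letters once and merging the ready-made pairs back positionally (alternative algorithm, same cost).

-- ===== PORT A =====
def pvAlpha : List Char := "ABCDEFGHIJKLMNOPQRSTUVWXYZ".toList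

-- A's pairing step: res so far, splited_antigramme buffer (as List Char)
def stepA (acc : List String × List Char) (c : Char) : List String × List Char :=
  let acc1 := if c ∈ pvAlpha then (acc.1, acc.2 ++ [c]) else (acc.1 ++ [String.ofList [c]], acc.2)
  if acc1.2.length = 2 then (acc1.1 ++ [String.ofList acc1.2], []) else acc1

def build_antigramme (decyphering_grid : List (String × String)) (key : String) : List String :=
  let d := PySem.Dict.ofList decyphering_grid
  let iter := (((d.get? (String.ofList (key.toList.take 1))).getD "").toList).length
  -- first loop: build the transposed string column-major (value[i]; default ' ' is never used inside Pre_)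
  let cyphered : List Char :=
    (List.range iter).foldl (fun acc i =>
      d.values.foldl (fun acc2 v => acc2 ++ [v.toList.getD i ' ']) acc) []
  -- second loop: pair the letters with the running buffer
  (cyphered.foldl stepA ([], [])).1

-- ===== PORT B =====
-- B's while loop 'j += 2' pairing consecutive letters, as the obvious structural recursion
def pairUp : List Char → List String
  | a :: b :: rest => String.ofList [a, b] :: pairUp rest
  | _ => []

-- B's merge step: res so far, index into the pre-built pairs, parity of letters seen
def mergeStep (pairs : List String) (acc : List String × Nat × Bool) (c : Char) : List String × Nat × Bool :=
  if c ∈ pvAlpha then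
    if acc.2.2 then (acc.1 ++ [pairs.getD acc.2.1 ""], acc.2.1 + 1, false)
    else (acc.1, acc.2.1, true)
  else (acc.1 ++ [String.ofList [c]], acc.2)

def build_antigramme_alt (decyphering_grid : List (String × String)) (key : String) : List String :=
  let d := PySem.Dict.ofList decyphering_grid
  let cols := d.values
  let n := (((d.get? (String.ofList (key.toList.take 1))).getD "").toList).length
  let chars := (List.range n).flatMap (fun i => cols.map (fun v => v.toList.getD i ' '))
  let letters := chars.filter (fun c => decide (c ∈ pvAlpha))
  let pairs := pairUp letters
  (chars.foldl (mergeStep pairs) ([], 0, false)).1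

-- ===== PRECONDITION & SPEC =====
-- Pre_ excludes exactly the inputs where Python A raises: empty key (IndexError on key[0]),
-- key[0] absent from the dict (KeyError), or some value shorter than the looked-up one (IndexError on value[i]).
def Pre_build_antigramme (decyphering_grid : List (String × String)) (key : String) : Prop :=
  key.toList ≠ [] ∧
  ((PySem.Dict.ofList decyphering_grid).get? (String.ofList (key.toList.take 1))).isSome = true ∧
  ∀ v ∈ (PySem.Dict.ofList decyphering_grid).values,
    (((PySem.Dict.ofList decyphering_grid).get? (String.ofList (key.toList.take 1))).map
      (fun s => s.toList.length)).getD Nat.zero ≤ v.toList.length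
instance (decyphering_grid : List (String × String)) (key : String) : Decidable (Pre_build_antigramme decyphering_grid key) := by unfold Pre_build_antigramme; infer_instance

def pvWitness_build_antigramme : (List (String × String)) × String := ([("C", "A.1"), ("R", "BD2")], "CRYPTO")

def Spec_build_antigramme (decyphering_grid : List (String × String)) (key : String) (out : List String) : Prop := out = build_antigramme_alt decyphering_grid key
instance (decyphering_grid : List (String × String)) (key : String) (out : List String) : Decidable (Spec_build_antigramme decyphering_grid key out) := by unfold Spec_build_antigramme; infer_instance

-- ===== CLAIM (what is proved, stated in full; the proofs are below) =====
def Claim_equal_build_antigramme : Prop := ∀ (decyphering_grid : List (String × String)) (key : String), Dom_build_antigramme decyphering_grid key → Pre_build_antigramme decyphering_grid key → Spec_build_antigramme decyphering_grid key (build_antigramme decyphering_grid key)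

-- ===== LEMMAS AND PROOFS =====

-- A's first loop builds the flatMap of the per-column maps
theorem cyphered_eq (vals : List String) (n : Nat) :
    (List.range n).foldl (fun acc i => vals.foldl (fun acc2 v => acc2 ++ [v.toList.getD i ' ']) acc) [] =
    (List.range n).flatMap (fun i => vals.map (fun v => v.toList.getD i ' ')) := by
  have inner : ∀ (i : Nat) (acc : List Char),
      vals.foldl (fun acc2 v => acc2 ++ [v.toList.getD i ' ']) acc =
      acc ++ vals.map (fun v => v.toList.getD i ' ') := by
    intro i acc
    induction vals generalizing acc with
    | nil => simp
    | cons v vs ihv => rw [List.foldl_cons, ihv, List.map_cons]; simp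
  induction n with
  | zero => simp
  | succ m ih =>
    rw [List.range_succ, List.foldl_append, ih, List.foldl_cons, List.foldl_nil, inner,
      List.flatMap_append]
    simp

theorem getD_drop (l : List String) (k : Nat) : l.getD k "" = (l.drop k).headD "" := by
  induction l generalizing k with
  | nil => simp
  | cons a t ih =>
    cases k with
    | zero => simp
    | succ k => simp [ih]

theorem drop_succ (l : List String) (k : Nat) : l.drop (k + 1) = (l.drop k).drop 1 := by
  rw [List.drop_drop]

-- the core invariant: A's fold with its buffer equals B's merge fold, given that the
-- pairs remaining from index k are exactly the pairing of buffer ++ letters of the suffix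
theorem mergeA (pairs : List String) (cs : List Char) :
    ∀ (res : List String) (sp : List Char) (k : Nat),
      (sp = [] ∨ ∃ p, sp = [p]) →
      pairs.drop k = pairUp (sp ++ cs.filter (fun c => decide (c ∈ pvAlpha))) →
      (cs.foldl stepA (res, sp)).1 =
      (cs.foldl (mergeStep pairs) (res, k, !sp.isEmpty)).1 := by
  induction cs with
  | nil => intro res sp k _ _; rfl
  | cons c cs ih =>
    intro res sp k hsp hq
    by_cases hc : c ∈ pvAlpha
    · rcases hsp with h0 | ⟨p, h1⟩
      · subst h0
        have hq' : pairs.drop k = pairUp ([c] ++ cs.filter (fun c => decide (c ∈ pvAlpha))) := by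
          simpa [List.filter_cons, hc] using hq
        have e1 : stepA (res, []) c = (res, [c]) := by simp [stepA, hc]
        have e2 : mergeStep pairs (res, k, !([] : List Char).isEmpty) c = (res, k, true) := by
          simp [mergeStep, hc]
        rw [List.foldl_cons, List.foldl_cons, e1, e2]
        simpa using ih res [c] k (Or.inr ⟨c, rfl⟩) hq'
      · subst h1
        have hq' : pairs.drop k =
            String.ofList [p, c] :: pairUp (cs.filter (fun c => decide (c ∈ pvAlpha))) := by
          simpa [List.filter_cons, hc, pairUp] using hq
        have hget : pairs.getD k "" = String.ofList [p, c] := by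
          rw [getD_drop, hq']; rfl
        have hdrop : pairs.drop (k + 1) = pairUp ([] ++ cs.filter (fun c => decide (c ∈ pvAlpha))) := by
          rw [drop_succ, hq']; simp
        have e1 : stepA (res, [p]) c = (res ++ [String.ofList [p, c]], []) := by
          simp [stepA, hc]
        have e2 : mergeStep pairs (res, k, !([p] : List Char).isEmpty) c =
            (res ++ [String.ofList [p, c]], k + 1, false) := by
          simp only [mergeStep, hc, if_pos, List.isEmpty_cons, Bool.not_false, hget]
        rw [List.foldl_cons, List.foldl_cons, e1, e2]
        simpa using ih (res ++ [String.ofList [p, c]]) [] (k + 1) (Or.inl rfl) hdrop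
    · have hq' : pairs.drop k = pairUp (sp ++ cs.filter (fun c => decide (c ∈ pvAlpha))) := by
        simpa [List.filter_cons, hc] using hq
      rcases hsp with h0 | ⟨p, h1⟩
      · subst h0
        have e1 : stepA (res, []) c = (res ++ [String.ofList [c]], []) := by simp [stepA, hc]
        have e2 : mergeStep pairs (res, k, !([] : List Char).isEmpty) c =
            (res ++ [String.ofList [c]], k, false) := by simp [mergeStep, hc]
        rw [List.foldl_cons, List.foldl_cons, e1, e2]
        simpa using ih (res ++ [String.ofList [c]]) [] k (Or.inl rfl) hq'
      · subst h1
        have e1 : stepA (res, [p]) c = (res ++ [String.ofList [c]], [p]) := by simp [stepA, hc]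
        have e2 : mergeStep pairs (res, k, !([p] : List Char).isEmpty) c =
            (res ++ [String.ofList [c]], k, true) := by simp [mergeStep, hc]
        rw [List.foldl_cons, List.foldl_cons, e1, e2]
        simpa using ih (res ++ [String.ofList [c]]) [p] k (Or.inr ⟨p, rfl⟩) hq'

-- ===== VERDICT (by name: the statement is the Claim_ definition above) =====
theorem build_antigramme_spec : Claim_equal_build_antigramme := by
  intro g key _ _
  unfold Spec_build_antigramme build_antigramme build_antigramme_alt
  simp only
  rw [cyphered_eq]
  exact mergeA _ _ [] [] 0 (Or.inl rfl) (by simp)
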